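-- pv_equiv track=rewrite | github.com/Lock1/IF4020-Kriptografi | Tucil 4/src/rsa.py | olahPesanFromKalimat
-- ===== SOURCE A (Python) =====
-- def olahPesanFromKalimat(pesan):
--     pesan = pesan.strip()
--     while len(pesan) % 4 != 0:
--         pesan += "X"
--     split_strings = [pesan[index : index + 4] for index in range(0, len(pesan), 4)]
--     res = []
--     for i in range (len(split_strings)):
--         temp = []
--         for j in range (len(split_strings[i])):
--             temp2 = (ord(split_strings[i][j].lower())-97)
--             if (temp2 < 10):
--                 temp3 = "0"+str(temp2)
--                 temp.append(temp3)
--             else: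
--                 temp.append(str(temp2))
--         res.append(str(temp[0]+temp[1]))
--         if (len(temp) != (4/2)):
--             res.append(str(temp[2]+temp[3]))
--     return res
-- ===== SOURCE B (Python) =====
-- def _code(c):
--     v = ord(c.lower()) - 97
--     return "0" + str(v) if v < 10 else str(v)
--
--
-- def olahPesanFromKalimat(pesan):
--     s = pesan.strip()
--     s += "X" * (-len(s) % 4)
--     codes = [_code(ch) for ch in s]
--     return [codes[i] + codes[i + 1] for i in range(0, len(codes), 2)]
-- ===== Notes on version B (the rewrite author's own statement) =====
-- stated objective: simpler
-- what changed: A's nested chunk-of-4 loop with an inner per-character index loop, a temp list and conditional reassembly is replaced by arithmetic padding to a multiple of 4, one flat list of per-character 2-digit codes, and a single pairing comprehension.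
import Mathlib
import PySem

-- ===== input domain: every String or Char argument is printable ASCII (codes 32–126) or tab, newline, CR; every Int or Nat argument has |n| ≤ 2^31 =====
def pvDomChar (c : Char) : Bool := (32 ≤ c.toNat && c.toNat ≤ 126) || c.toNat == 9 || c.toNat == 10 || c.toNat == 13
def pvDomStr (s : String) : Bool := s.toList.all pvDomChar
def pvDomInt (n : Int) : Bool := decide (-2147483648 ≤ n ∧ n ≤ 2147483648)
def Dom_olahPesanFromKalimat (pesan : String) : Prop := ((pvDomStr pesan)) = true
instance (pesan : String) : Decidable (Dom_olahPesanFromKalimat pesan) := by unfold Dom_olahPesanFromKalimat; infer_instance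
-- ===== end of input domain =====

-- B replaces A's nested chunk-of-4 / inner-index / temp-reassembly loops by a flat per-character
-- code table paired in one pass (objective: simpler); same return value on every input.

-- ===== PORT A =====
-- the while loop: while len(pesan) % 4 != 0: pesan += "X"
def pvPadA (s : List Char) : List Char :=
  if s.length % 4 ≠ 0 then pvPadA (s ++ ['X']) else s
  termination_by ((4 - s.length % 4) % 4)
  decreasing_by simp; omega

def olahPesanFromKalimat (pesan : String) : List String :=
  let p := pvPadA (PySem.Chars.strip pesan.toList)
  let splits := (PySem.List.pyRange 0 (p.length : Int) 4).map
      (fun idx => PySem.List.slice p (some idx) (some (idx + 4)))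
  (PySem.List.pyRange 0 (splits.length : Int) 1).foldl
    (fun res i =>
      let chunk := PySem.List.pyGetD splits i []
      let temp := (PySem.List.pyRange 0 (chunk.length : Int) 1).map
        (fun j =>
          let temp2 : Int := ((PySem.Chars.lowerChar (PySem.List.pyGetD chunk j 'X')).toNat : Int) - 97
          if temp2 < 10 then '0' :: PySem.Int.toChars temp2 else PySem.Int.toChars temp2)
      let res := res ++ [String.ofList (PySem.List.pyGetD temp 0 [] ++ PySem.List.pyGetD temp 1 [])]
      if temp.length ≠ 2 then
        res ++ [String.ofList (PySem.List.pyGetD temp 2 [] ++ PySem.List.pyGetD temp 3 [])]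
      else res)
    []

-- ===== PORT B =====
def pvCode (c : Char) : List Char :=
  let v : Int := ((PySem.Chars.lowerChar c).toNat : Int) - 97
  if v < 10 then '0' :: PySem.Int.toChars v else PySem.Int.toChars v

def olahPesanFromKalimat_alt (pesan : String) : List String :=
  let s := PySem.Chars.strip pesan.toList
  let s := s ++ List.replicate (PySem.Int.mod (-(s.length : Int)) 4).toNat 'X'
  let codes := s.map pvCode
  (PySem.List.pyRange 0 (codes.length : Int) 2).map
    (fun i => String.ofList (PySem.List.pyGetD codes i [] ++ PySem.List.pyGetD codes (i + 1) []))

-- ===== PRECONDITION & SPEC =====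
def Spec_olahPesanFromKalimat (pesan : String) (out : List String) : Prop := out = olahPesanFromKalimat_alt pesan
instance (pesan : String) (out : List String) : Decidable (Spec_olahPesanFromKalimat pesan out) := by unfold Spec_olahPesanFromKalimat; infer_instance

-- ===== CLAIM (what is proved, stated in full; the proofs are below) =====
def Claim_equal_olahPesanFromKalimat : Prop := ∀ (pesan : String), Dom_olahPesanFromKalimat pesan → Spec_olahPesanFromKalimat pesan (olahPesanFromKalimat pesan)

-- ===== LEMMAS AND PROOFS =====

-- the padding while loop appends exactly (-len) % 4 'X' characters
lemma pvPadA_eq (s : List Char) :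
    pvPadA s = s ++ List.replicate ((4 - s.length % 4) % 4) 'X' := by
  fun_induction pvPadA s with
  | case1 s hne ih =>
      rw [ih]
      have hl : (s ++ ['X']).length = s.length + 1 := by simp
      rw [hl]
      have : (4 - (s.length + 1) % 4) % 4 + 1 = (4 - s.length % 4) % 4 := by omega
      rw [← this, List.append_assoc]
      simp [List.replicate_succ]
  | case2 s hne =>
      have : (4 - s.length % 4) % 4 = 0 := by omega
      simp [this]

-- A's per-chunk output (the body of A's outer loop, as a function of the chunk)
def pvG (chunk : List Char) : List String :=
  let temp := (PySem.List.pyRange 0 (chunk.length : Int) 1).map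
    (fun j =>
      let temp2 : Int := ((PySem.Chars.lowerChar (PySem.List.pyGetD chunk j 'X')).toNat : Int) - 97
      if temp2 < 10 then '0' :: PySem.Int.toChars temp2 else PySem.Int.toChars temp2)
  let first := [String.ofList (PySem.List.pyGetD temp 0 [] ++ PySem.List.pyGetD temp 1 [])]
  if temp.length ≠ 2 then
    first ++ [String.ofList (PySem.List.pyGetD temp 2 [] ++ PySem.List.pyGetD temp 3 [])]
  else first

-- on an exact 4-chunk, A's body emits the two code pairs
lemma pvG_quad (a b c d : Char) :
    pvG [a, b, c, d] = [String.ofList (pvCode a ++ pvCode b), String.ofList (pvCode c ++ pvCode d)] := by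
  norm_num [pvG, pvCode, pysem, PySem.List.pyGetD, PySem.List.pyGet?, PySem.List.pyIdx?, PySem.List.pyRange]
  rfl

lemma pyGetD_map_code (t : List Char) (j : Nat) (x : Char) (hx : t[j]? = some x) :
    PySem.List.pyGetD (t.map pvCode) (j : Int) [] = pvCode x := by
  rw [PySem.List.pyGetD_natCast]
  simp [List.getD_eq_getElem?_getD, hx]

-- core: A's chunks-of-4 output = B's pairing of the flat code table (first 4*m characters)
lemma pvCore (m : Nat) (t : List Char) (h : 4 * m ≤ t.length) :
    (List.range m).flatMap
        (fun (k : Nat) => pvG (PySem.List.slice t (some (4 * (k : Int))) (some (4 * (k : Int) + 4)))) =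
      (List.range (2 * m)).map
        (fun (k : Nat) => String.ofList (PySem.List.pyGetD (t.map pvCode) (2 * (k : Int)) [] ++
                             PySem.List.pyGetD (t.map pvCode) (2 * (k : Int) + 1) [])) := by
  induction m with
  | zero => simp
  | succ m ih =>
    have h4 : 4 * m + 4 ≤ t.length := by omega
    have hlen : 4 ≤ (t.drop (4 * m)).length := by
      simp only [List.length_drop]; omega
    obtain ⟨a, b, c, d, rest, hd⟩ :
        ∃ a b c d rest, t.drop (4 * m) = a :: b :: c :: d :: rest := by
      rcases hdrop : t.drop (4 * m) with _ | ⟨a, _ | ⟨b, _ | ⟨c, _ | ⟨d, rest⟩⟩⟩⟩ <;>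
        (try (rw [hdrop] at hlen; simp at hlen)) <;> exact ⟨a, b, c, d, rest, rfl⟩
    have ga : t[4 * m]? = some a := by
      have h0 : (t.drop (4 * m))[0]? = t[4 * m + 0]? := List.getElem?_drop
      rw [hd] at h0
      simpa using h0.symm
    have gb : t[4 * m + 1]? = some b := by
      have h0 : (t.drop (4 * m))[1]? = t[4 * m + 1]? := List.getElem?_drop
      rw [hd] at h0
      simpa using h0.symm
    have gc : t[4 * m + 2]? = some c := by
      have h0 : (t.drop (4 * m))[2]? = t[4 * m + 2]? := List.getElem?_drop
      rw [hd] at h0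
      simpa using h0.symm
    have gd : t[4 * m + 3]? = some d := by
      have h0 : (t.drop (4 * m))[3]? = t[4 * m + 3]? := List.getElem?_drop
      rw [hd] at h0
      simpa using h0.symm
    have hsl : PySem.List.slice t (some (4 * ((m : Nat) : Int))) (some (4 * ((m : Nat) : Int) + 4))
        = [a, b, c, d] := by
      have e1 : (4 * ((m : Nat) : Int)) = ((4 * m : Nat) : Int) := by push_cast; ring
      have e2 : (4 * ((m : Nat) : Int) + 4) = ((4 * m + 4 : Nat) : Int) := by push_cast; ring
      rw [e2, e1, PySem.List.slice_natCast, hd]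
      simp
    rw [List.range_succ, List.flatMap_append, ih (by omega)]
    have h2 : 2 * (m + 1) = (2 * m + 1) + 1 := by ring
    rw [h2, List.range_succ, List.range_succ, List.map_append, List.map_append]
    have e1 : (2 * ((2 * m : Nat) : Int)) = ((4 * m : Nat) : Int) := by push_cast; ring
    have e3 : (2 * ((2 * m + 1 : Nat) : Int)) = ((4 * m + 2 : Nat) : Int) := by push_cast; ring
    have f2 : ((4 * m : Nat) : Int) + 1 = ((4 * m + 1 : Nat) : Int) := by push_cast; ring
    have f4 : ((4 * m + 2 : Nat) : Int) + 1 = ((4 * m + 3 : Nat) : Int) := by push_cast; ring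
    have ra := pyGetD_map_code t (4 * m) a ga
    have rb := pyGetD_map_code t (4 * m + 1) b gb
    have rc := pyGetD_map_code t (4 * m + 2) c gc
    have rd := pyGetD_map_code t (4 * m + 3) d gd
    simp only [List.flatMap_cons, List.flatMap_nil, List.map_cons, List.map_nil,
      List.append_nil, hsl, pvG_quad, e1, e3, f2, f4, ra, rb, rc, rd, List.append_assoc,
      List.cons_append, List.nil_append]

-- A's outer foldl over chunk indices is the concatenation of per-chunk outputs
lemma loopA_eq (splits : List (List Char)) :
    (PySem.List.pyRange 0 (splits.length : Int) 1).foldl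
      (fun res i =>
        let chunk := PySem.List.pyGetD splits i []
        let temp := (PySem.List.pyRange 0 (chunk.length : Int) 1).map
          (fun j =>
            let temp2 : Int := ((PySem.Chars.lowerChar (PySem.List.pyGetD chunk j 'X')).toNat : Int) - 97
            if temp2 < 10 then '0' :: PySem.Int.toChars temp2 else PySem.Int.toChars temp2)
        let res := res ++ [String.ofList (PySem.List.pyGetD temp 0 [] ++ PySem.List.pyGetD temp 1 [])]
        if temp.length ≠ 2 then
          res ++ [String.ofList (PySem.List.pyGetD temp 2 [] ++ PySem.List.pyGetD temp 3 [])]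
        else res)
      [] = splits.flatMap pvG := by
  have hb : (fun (res : List String) (i : Int) =>
        let chunk := PySem.List.pyGetD splits i []
        let temp := (PySem.List.pyRange 0 (chunk.length : Int) 1).map
          (fun j =>
            let temp2 : Int := ((PySem.Chars.lowerChar (PySem.List.pyGetD chunk j 'X')).toNat : Int) - 97
            if temp2 < 10 then '0' :: PySem.Int.toChars temp2 else PySem.Int.toChars temp2)
        let res := res ++ [String.ofList (PySem.List.pyGetD temp 0 [] ++ PySem.List.pyGetD temp 1 [])]
        if temp.length ≠ 2 then
          res ++ [String.ofList (PySem.List.pyGetD temp 2 [] ++ PySem.List.pyGetD temp 3 [])]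
        else res)
      = (fun res i => res ++ pvG (PySem.List.pyGetD splits i [])) := by
    funext res i
    simp only [pvG]
    split
    · simp
    · simp
  rw [hb, PySem.List.foldl_pyRange_zero_pyGetD' splits [] (fun res chunk => res ++ pvG chunk) [],
      PySem.List.foldl_append_eq_flatMap]
  simp

lemma main_eq (pesan : String) : olahPesanFromKalimat pesan = olahPesanFromKalimat_alt pesan := by
  unfold olahPesanFromKalimat olahPesanFromKalimat_alt
  simp only [loopA_eq]
  have hm' : (PySem.Int.mod (-((PySem.Chars.strip pesan.toList).length : Int)) 4).toNat
      = (4 - (PySem.Chars.strip pesan.toList).length % 4) % 4 := by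
    rw [PySem.Int.mod_eq_emod_of_pos (by norm_num)]
    omega
  rw [pvPadA_eq, hm']
  generalize (PySem.Chars.strip pesan.toList) = s0
  set t := s0 ++ List.replicate ((4 - s0.length % 4) % 4) 'X' with ht
  obtain ⟨m, hm⟩ : ∃ m, t.length = 4 * m := by
    refine ⟨t.length / 4, ?_⟩
    have : t.length = s0.length + (4 - s0.length % 4) % 4 := by simp [ht]
    omega
  have hlm : (List.map pvCode t).length = 4 * m := by simp [hm]
  rw [PySem.List.pyRange_of_pos 0 ((t.length : Nat) : Int) (by norm_num),
      PySem.List.pyRange_of_pos 0 (((List.map pvCode t).length : Nat) : Int) (by norm_num)]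
  have cA : (if (0:Int) < ((t.length : Nat) : Int) then ((((t.length : Nat) : Int) - 0 + 4 - 1)/4).toNat else 0) = m := by
    rw [hm]; push_cast; split <;> omega
  have cB : (if (0:Int) < (((List.map pvCode t).length : Nat) : Int) then (((((List.map pvCode t).length : Nat) : Int) - 0 + 2 - 1)/2).toNat else 0) = 2 * m := by
    rw [hlm]; push_cast; split <;> omega
  rw [cA, cB]
  simp only [List.flatMap_map, List.map_map, Function.comp_def, zero_add]
  exact pvCore m t (by omega)

-- ===== VERDICT (by name: the statement is the Claim_ definition above) =====
theorem olahPesanFromKalimat_spec : Claim_equal_olahPesanFromKalimat := by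
  intro pesan _
  unfold Spec_olahPesanFromKalimat
  exact main_eq pesan
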